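-- pv_equiv track=rewrite | github.com/jvdheyden/jobwatch | scripts/repair_source.py | select_primary_repair_file
-- ===== SOURCE A (Python) =====
-- def select_primary_repair_file(files_touched: list[str], fallback: str) -> str:
--     for path in files_touched:
--         if path.startswith(("scripts/", "tests/", ".agents/")):
--             return path
--     for path in files_touched:
--         if path.endswith((".py", ".sh", ".md", ".json")):
--             return path
--     return fallback
-- ===== SOURCE B (Python) =====
-- def select_primary_repair_file(files_touched: list[str], fallback: str) -> str:
--     cand = None
--     for path in files_touched:
--         if path.startswith(("scripts/", "tests/", ".agents/")):
--             return path
--         if cand is None and path.endswith((".py", ".sh", ".md", ".json")):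
--             cand = path
--     return cand if cand is not None else fallback
-- ===== Notes on version B (the rewrite author's own statement) =====
-- stated objective: alternative
-- what changed: Replaces A's two independent scans of files_touched by a single pass that returns immediately on a prefix match and keeps the first suffix match in one accumulator, falling back after the loop.
import Mathlib
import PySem

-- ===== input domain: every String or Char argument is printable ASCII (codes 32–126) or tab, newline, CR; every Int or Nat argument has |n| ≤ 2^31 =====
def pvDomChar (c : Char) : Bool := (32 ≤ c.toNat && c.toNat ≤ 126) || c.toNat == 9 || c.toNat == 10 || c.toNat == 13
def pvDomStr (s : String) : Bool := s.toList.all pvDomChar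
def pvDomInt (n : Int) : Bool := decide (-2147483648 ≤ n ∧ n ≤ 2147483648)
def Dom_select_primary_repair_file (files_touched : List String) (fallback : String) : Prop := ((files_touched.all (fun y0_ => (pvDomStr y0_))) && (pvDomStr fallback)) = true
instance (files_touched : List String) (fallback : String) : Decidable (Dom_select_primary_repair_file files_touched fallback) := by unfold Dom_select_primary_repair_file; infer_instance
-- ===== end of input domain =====

-- B performs one pass (early return on prefix match, first suffix match kept in an accumulator)
-- instead of A's two independent scans; objective: alternative decomposition, same cost.

-- ===== PORT A =====
-- path.startswith(("scripts/", "tests/", ".agents/"))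
def pvPrefMatch (p : String) : Bool :=
  PySem.Str.startswith p "scripts/" || PySem.Str.startswith p "tests/" || PySem.Str.startswith p ".agents/"

-- path.endswith((".py", ".sh", ".md", ".json"))
def pvSufMatch (p : String) : Bool :=
  PySem.Str.endswith p ".py" || PySem.Str.endswith p ".sh" || PySem.Str.endswith p ".md" || PySem.Str.endswith p ".json"

-- first for-loop of A: returns the first prefix-matching path, if any
def pvLoop1 : List String → Option String
  | [] => none
  | p :: rest => if pvPrefMatch p then some p else pvLoop1 rest

-- second for-loop of A: returns the first suffix-matching path, if any
def pvLoop2 : List String → Option String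
  | [] => none
  | p :: rest => if pvSufMatch p then some p else pvLoop2 rest

def select_primary_repair_file (files_touched : List String) (fallback : String) : String :=
  match pvLoop1 files_touched with
  | some p => p
  | none =>
    match pvLoop2 files_touched with
    | some p => p
    | none => fallback

-- ===== PORT B =====
-- B's single loop with accumulator `cand`
def pvAltLoop : List String → Option String → String → String
  | [], cand, fb => match cand with | some c => c | none => fb
  | p :: rest, cand, fb =>
    if pvPrefMatch p then p
    else if cand.isNone && pvSufMatch p then pvAltLoop rest (some p) fb
    else pvAltLoop rest cand fb

def select_primary_repair_file_alt (files_touched : List String) (fallback : String) : String :=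
  pvAltLoop files_touched none fallback

-- ===== PRECONDITION & SPEC =====
def Spec_select_primary_repair_file (files_touched : List String) (fallback : String) (out : String) : Prop := out = select_primary_repair_file_alt files_touched fallback
instance (files_touched : List String) (fallback : String) (out : String) : Decidable (Spec_select_primary_repair_file files_touched fallback out) := by unfold Spec_select_primary_repair_file; infer_instance

-- ===== CLAIM (what is proved, stated in full; the proofs are below) =====
def Claim_equal_select_primary_repair_file : Prop := ∀ (files_touched : List String) (fallback : String), Dom_select_primary_repair_file files_touched fallback → Spec_select_primary_repair_file files_touched fallback (select_primary_repair_file files_touched fallback)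

-- ===== LEMMAS AND PROOFS =====
-- invariant: B's loop with accumulator `cand` equals A's structure where `cand`
-- takes priority over the remaining suffix scan
theorem pvAltLoop_eq (files : List String) (cand : Option String) (fb : String) :
    pvAltLoop files cand fb =
      match pvLoop1 files with
      | some p => p
      | none =>
        match cand with
        | some c => c
        | none =>
          match pvLoop2 files with
          | some p => p
          | none => fb :=
  by
  induction files generalizing cand with
  | nil => cases cand <;> rfl
  | cons p rest ih =>
    simp only [pvAltLoop, pvLoop1, pvLoop2]
    by_cases hp : pvPrefMatch p
    · simp [hp]
    · simp only [hp, if_false, Bool.false_eq_true]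
      cases cand with
      | some c =>
        simp only [Option.isNone, Bool.false_and, if_false, Bool.false_eq_true]
        rw [ih]
      | none =>
        by_cases hs : pvSufMatch p
        · simp only [Option.isNone, Bool.true_and, hs, if_true]
          rw [ih]
        · simp only [Option.isNone, Bool.true_and, hs, if_false, Bool.false_eq_true]
          rw [ih]

-- ===== VERDICT (by name: the statement is the Claim_ definition above) =====
theorem select_primary_repair_file_spec : Claim_equal_select_primary_repair_file := by
  intro files fb _
  unfold Spec_select_primary_repair_file select_primary_repair_file select_primary_repair_file_alt
  rw [pvAltLoop_eq]
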